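-- pv_equiv track=rewrite | github.com/Flambe02/superdog-backend | docs/txt-to-csv-converter.py | write_csv_file
-- ===== SOURCE A (Python) =====
-- def write_csv_file(entries, fieldnames, output_file, max_size=4*1024*1024):
--     """
--     Écrit les entrées dans un fichier CSV en respectant la limite de taille
--     """
--     current_size = 0
--     current_entries = []
--     header_size = len(','.join(fieldnames).encode('utf-8')) + 2
--     current_size = header_size
--
--     for entry in entries:
--         entry_size = sum(len(str(value).encode('utf-8')) + 1 for value in entry.values())
--         if current_size + entry_size > max_size:
--             return current_entries, entries[len(current_entries):]
--
--         current_entries.append(entry)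
--         current_size += entry_size
--
--     return current_entries, entries[len(current_entries):]
-- ===== SOURCE B (Python) =====
-- def write_csv_file(entries, fieldnames, output_file, max_size=4*1024*1024):
--     header_size = len(','.join(fieldnames).encode('utf-8')) + 2
--     # cumulative byte totals seeded with the header size
--     totals = []
--     t = header_size
--     for e in entries:
--         t += sum(len(str(v).encode('utf-8')) + 1 for v in e.values())
--         totals.append(t)
--     # first index whose cumulative total exceeds the limit (strict >)
--     k = next((i for i, t in enumerate(totals) if t > max_size), len(entries))
--     return entries[:k], entries[k:]
-- ===== Notes on version B (the rewrite author's own statement) =====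
-- stated objective: alternative
-- what changed: B replaces A's incremental append-and-test loop by computing per-entry byte sizes, building the running cumulative totals seeded with the header size, locating the first index whose total exceeds max_size, and slicing the list there.
import Mathlib
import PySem

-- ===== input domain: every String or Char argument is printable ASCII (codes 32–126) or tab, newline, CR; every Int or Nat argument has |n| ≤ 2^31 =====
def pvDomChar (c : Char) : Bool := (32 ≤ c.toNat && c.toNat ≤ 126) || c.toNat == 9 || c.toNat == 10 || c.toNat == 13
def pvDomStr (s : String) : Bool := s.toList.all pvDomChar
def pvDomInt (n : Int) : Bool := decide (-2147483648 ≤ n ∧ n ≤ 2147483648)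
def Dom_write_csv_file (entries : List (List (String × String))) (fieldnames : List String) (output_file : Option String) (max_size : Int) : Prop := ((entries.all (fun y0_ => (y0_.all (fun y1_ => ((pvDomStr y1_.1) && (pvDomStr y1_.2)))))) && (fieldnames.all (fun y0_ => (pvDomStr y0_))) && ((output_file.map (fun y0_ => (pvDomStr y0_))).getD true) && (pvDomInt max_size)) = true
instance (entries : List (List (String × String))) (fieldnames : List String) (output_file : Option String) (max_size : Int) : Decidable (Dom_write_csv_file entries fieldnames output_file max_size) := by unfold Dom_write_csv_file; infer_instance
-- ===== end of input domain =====

-- B builds the cumulative byte totals (seeded with the header size) and slices the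
-- list at the first index whose total exceeds max_size, instead of A's
-- append-and-test loop; objective: alternative decomposition, same cost.
-- (entry sizes: Dom strings are ASCII, so utf-8 byte length = code-point length.)

-- ===== PORT A =====
-- entry_size = sum(len(str(value).encode('utf-8')) + 1 for value in entry.values())
-- (the dict 'entry' arrives as an assoc list; .values() goes through PySem.Dict)
def pvEntrySize (e : List (String × String)) : Int :=
  (((PySem.Dict.ofList e).values).map (fun v => PySem.Str.len v + 1)).sum

def pvALoop (rest : List (List (String × String))) (cur : List (List (String × String)))
    (csize : Int) (all : List (List (String × String))) (m : Int) :
    (List (List (String × String))) × (List (List (String × String))) :=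
  match rest with
  | [] => (cur, PySem.List.slice all (some ((cur.length : Nat) : Int)) none)
  | e :: rs =>
    let es := pvEntrySize e
    if csize + es > m then
      (cur, PySem.List.slice all (some ((cur.length : Nat) : Int)) none)
    else
      pvALoop rs (cur ++ [e]) (csize + es) all m

def write_csv_file (entries : List (List (String × String))) (fieldnames : List String) (output_file : Option String) (max_size : Int) : (List (List (String × String))) × (List (List (String × String))) :=
  let header_size := PySem.Str.len (PySem.Str.join "," fieldnames) + 2
  pvALoop entries [] header_size entries max_size

-- ===== PORT B =====
-- running cumulative totals seeded with t (the loop 't += size; totals.append(t)')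
def pvTotals (sizes : List Int) (t : Int) : List Int :=
  match sizes with
  | [] => []
  | s :: rs => (t + s) :: pvTotals rs (t + s)

-- k = next((i for i, t in enumerate(totals) if t > max_size), len(entries))
def pvFindK (totals : List Int) (m : Int) : Nat :=
  match totals with
  | [] => 0
  | t :: rs => if t > m then 0 else pvFindK rs m + 1

def write_csv_file_alt (entries : List (List (String × String))) (fieldnames : List String) (output_file : Option String) (max_size : Int) : (List (List (String × String))) × (List (List (String × String))) :=
  let header_size := PySem.Str.len (PySem.Str.join "," fieldnames) + 2
  let totals := pvTotals (entries.map pvEntrySize) header_size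
  let k := pvFindK totals max_size
  (entries.take k, entries.drop k)

-- ===== PRECONDITION & SPEC =====
def Spec_write_csv_file (entries : List (List (String × String))) (fieldnames : List String) (output_file : Option String) (max_size : Int) (out : (List (List (String × String))) × (List (List (String × String)))) : Prop := out = write_csv_file_alt entries fieldnames output_file max_size
instance (entries : List (List (String × String))) (fieldnames : List String) (output_file : Option String) (max_size : Int) (out : (List (List (String × String))) × (List (List (String × String)))) : Decidable (Spec_write_csv_file entries fieldnames output_file max_size out) := by unfold Spec_write_csv_file; infer_instance

-- ===== CLAIM (what is proved, stated in full; the proofs are below) =====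
def Claim_equal_write_csv_file : Prop := ∀ (entries : List (List (String × String))) (fieldnames : List String) (output_file : Option String) (max_size : Int), Dom_write_csv_file entries fieldnames output_file max_size → Spec_write_csv_file entries fieldnames output_file max_size (write_csv_file entries fieldnames output_file max_size)

-- ===== LEMMAS AND PROOFS =====
theorem pvALoop_eq (rest : List (List (String × String))) :
    ∀ (cur : List (List (String × String))) (csize : Int)
      (all : List (List (String × String))) (m : Int), all = cur ++ rest →
    pvALoop rest cur csize all m =
      (cur ++ rest.take (pvFindK (pvTotals (rest.map pvEntrySize) csize) m),
       rest.drop (pvFindK (pvTotals (rest.map pvEntrySize) csize) m)) := by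
  induction rest with
  | nil =>
    intro cur csize all m hall
    subst hall
    simp [pvALoop, pvTotals, pvFindK, PySem.List.slice_from_natCast]
  | cons e rs ih =>
    intro cur csize all m hall
    by_cases h : csize + pvEntrySize e > m
    · subst hall
      simp [pvALoop, pvTotals, pvFindK, h, PySem.List.slice_from_natCast]
    · have : all = (cur ++ [e]) ++ rs := by simp [hall]
      rw [show pvALoop (e :: rs) cur csize all m
            = pvALoop rs (cur ++ [e]) (csize + pvEntrySize e) all m by
            simp [pvALoop, h],
         ih (cur ++ [e]) (csize + pvEntrySize e) all m this]
      simp [pvTotals, pvFindK, h]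

-- ===== VERDICT (by name: the statement is the Claim_ definition above) =====
theorem write_csv_file_spec : Claim_equal_write_csv_file := by
  intro entries fieldnames output_file max_size _
  unfold Spec_write_csv_file write_csv_file write_csv_file_alt
  rw [pvALoop_eq entries [] _ entries max_size (by simp)]
  simp
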